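-- pv_equiv track=rewrite | github.com/Aditya-a404a/Codeforces-1 | B_Maximum_Product.py | max_product_of_five
-- ===== SOURCE A (Python) =====
-- import math
--
-- def max_product_of_five(a):
--     n = len(a)
--     # Find the maximum element to check if all are negative
--     mx = max(a)
--     # Sort descending by absolute value
--     a.sort(key=abs, reverse=True)
--
--     # If all elements are negative, pick the five with smallest abs (to get the largest negative product)
--     if mx < 0:
--         a.sort(key=abs)
--         return math.prod(a[:5])
--
--     # Otherwise, start with the product of the top 5 by abs
--     ans = math.prod(a[:5])
--
--     # Try replacing each of the first 5 picks with each later element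
--     # (mirrors the double loop in your C++ code)
--     for i in range(5, n):
--         for j in range(5):
--             tmp = a[i]
--             for k in range(5):
--                 if k != j:
--                     tmp *= a[k]
--             ans = max(ans, tmp)
--
--     return ans
-- ===== SOURCE B (Python) =====
-- import math
--
-- def max_product_of_five(a):
--     if all(x < 0 for x in a):
--         a.sort(key=abs)
--         return math.prod(a[:5])
--     a.sort(key=abs, reverse=True)
--     picks = a[:5]
--     rest = a[5:]
--     base = math.prod(picks)
--     if not rest:
--         return base
--     hi = max(rest)
--     lo = min(rest)
--     # prefix and suffix running products of the five picks
--     pre = [1]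
--     p = 1
--     for x in picks:
--         p *= x
--         pre.append(p)
--     suf = [1]
--     q = 1
--     for x in reversed(picks):
--         q *= x
--         suf.append(q)
--     best = base
--     for j in range(5):
--         c = pre[j] * suf[4 - j]
--         best = max(best, c * hi, c * lo)
--     return best
-- ===== Notes on version B (the rewrite author's own statement) =====
-- stated objective: faster
-- what changed: B replaces A's double replacement loop (every tail element tried in each of the 5 slots, 25 multiplications each) by one max/min pass over the tail plus prefix/suffix running products of the five picks, since for a fixed excluded-slot product c the best tail replacement is max(c*max(tail), c*min(tail)); the all-negative case is a single ascending sort instead of A's sort-twice.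
-- outside the precondition, e.g. on max_product_of_five([]): A raises ValueError, B returns 1
import Mathlib
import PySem

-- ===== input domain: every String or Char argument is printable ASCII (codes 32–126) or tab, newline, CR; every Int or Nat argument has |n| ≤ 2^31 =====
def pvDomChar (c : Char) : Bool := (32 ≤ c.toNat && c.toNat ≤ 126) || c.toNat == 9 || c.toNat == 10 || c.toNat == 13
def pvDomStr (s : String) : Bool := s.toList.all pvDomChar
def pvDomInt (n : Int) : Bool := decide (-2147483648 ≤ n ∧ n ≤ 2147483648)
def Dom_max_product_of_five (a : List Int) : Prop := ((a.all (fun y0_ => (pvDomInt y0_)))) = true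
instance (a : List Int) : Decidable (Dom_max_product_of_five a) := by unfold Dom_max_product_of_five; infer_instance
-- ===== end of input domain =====

-- B replaces A's O(25·n) replacement double loop by one max/min pass over the tail plus
-- prefix/suffix running products of the five picks (constant-factor algorithmic change);
-- return-value equivalence only: both programs sort the argument list in place.

-- ===== PORT A =====
def max_product_of_five (a : List Int) : Int :=
  let n : Int := (a.length : Int)
  match PySem.List.max? a (fun x => x) with
  | none => 0   -- unreachable under Pre_: max([]) raises ValueError
  | some mx =>
    let s := PySem.List.sorted a (fun x => |x|) true
    if mx < 0 then
      let s2 := PySem.List.sorted s (fun x => |x|) false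
      (PySem.List.slice s2 none (some 5)).prod
    else
      let ans := (PySem.List.slice s none (some 5)).prod
      (PySem.List.pyRange 5 n 1).foldl (fun ans i =>
        (PySem.List.pyRange 0 5 1).foldl (fun ans j =>
          let tmp := (PySem.List.pyRange 0 5 1).foldl
            (fun t k => if k ≠ j then t * PySem.List.pyGetD s k 0 else t)
            (PySem.List.pyGetD s i 0)
          max ans tmp) ans) ans

-- ===== PORT B =====
def max_product_of_five_alt (a : List Int) : Int :=
  if a.all (fun x => decide (x < 0)) then
    -- all-negative case: the five with smallest absolute value
    (PySem.List.slice (PySem.List.sorted a (fun x => |x|) false) none (some 5)).prod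
  else
    let s := PySem.List.sorted a (fun x => |x|) true
    let picks := PySem.List.slice s none (some 5)
    let rest := PySem.List.slice s (some 5) none
    let base := picks.prod
    if rest = [] then base
    else
      let hi := (PySem.List.max? rest (fun x => x)).getD 0
      let lo := (PySem.List.min? rest (fun x => x)).getD 0
      -- prefix and suffix running products of the picks ('reversed(picks)' ported as .reverse)
      let pre := (picks.foldl (fun st x => (st.1 ++ [st.2 * x], st.2 * x)) ([(1:Int)], (1:Int))).1
      let suf := (picks.reverse.foldl (fun st x => (st.1 ++ [st.2 * x], st.2 * x)) ([(1:Int)], (1:Int))).1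
      (PySem.List.pyRange 0 5 1).foldl (fun best j =>
        let c := PySem.List.pyGetD pre j 0 * PySem.List.pyGetD suf (4 - j) 0
        max (max best (c * hi)) (c * lo)) base

-- ===== PRECONDITION & SPEC =====
-- max(a) raises ValueError on the empty list, so Pre_ excludes only a = [].
def Pre_max_product_of_five (a : List Int) : Prop := a ≠ []
instance (a : List Int) : Decidable (Pre_max_product_of_five a) := by unfold Pre_max_product_of_five; infer_instance
def pvWitness_max_product_of_five : List Int := [3, -1, 4, 1, -5, 9, 2]

def Spec_max_product_of_five (a : List Int) (out : Int) : Prop := out = max_product_of_five_alt a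
instance (a : List Int) (out : Int) : Decidable (Spec_max_product_of_five a out) := by unfold Spec_max_product_of_five; infer_instance

-- ===== CLAIM (what is proved, stated in full; the proofs are below) =====
def Claim_equal_max_product_of_five : Prop := ∀ (a : List Int), Dom_max_product_of_five a → Pre_max_product_of_five a → Spec_max_product_of_five a (max_product_of_five a)

-- ===== LEMMAS AND PROOFS =====

-- A's inner replacement loop is init * (product of the other four picks)
theorem pv_foldl_if_mul (l : List Int) (j : Int) (g : Int → Int) (t0 : Int) :
    l.foldl (fun t k => if k ≠ j then t * g k else t) t0
      = t0 * ((l.filter (fun k => k ≠ j)).map g).prod := by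
  induction l generalizing t0 with
  | nil => simp
  | cons x xs ih =>
    rw [List.foldl_cons, List.filter_cons]
    by_cases hx : x ≠ j
    · rw [if_pos hx, if_pos (by simpa using hx), ih]
      simp [mul_assoc]
    · rw [if_neg hx, if_neg (by simpa using hx), ih]

-- the double sort of A's all-negative branch is the single ascending sort:
-- on an all-negative list, |·|-ascending order is exactly (weakly) value-descending order
theorem pv_double_sort (a : List Int) (hneg : ∀ x ∈ a, x < 0) :
    PySem.List.sorted (PySem.List.sorted a (fun x => |x|) true) (fun x => |x|) false
      = PySem.List.sorted a (fun x => |x|) false := by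
  have vdesc : ∀ (l : List Int), (∀ x ∈ l, x < 0) →
      l.Pairwise (fun x y => |x| ≤ |y|) → l.Pairwise (fun x y => y ≤ x) := by
    intro l hl hp
    refine List.Pairwise.imp_of_mem ?_ hp
    intro x y hx hy hxy
    have hx0 := hl x hx; have hy0 := hl y hy
    rw [abs_of_neg hx0, abs_of_neg hy0] at hxy
    omega
  have p1 : (PySem.List.sorted (PySem.List.sorted a (fun x => |x|) true) (fun x => |x|) false).Perm a :=
    (PySem.List.sorted_perm _ _ _).trans (PySem.List.sorted_perm _ _ _)
  have p2 : (PySem.List.sorted a (fun x => |x|) false).Perm a := PySem.List.sorted_perm _ _ _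
  have m1 : ∀ x ∈ PySem.List.sorted (PySem.List.sorted a (fun x => |x|) true) (fun x => |x|) false, x < 0 :=
    fun x hx => hneg x (p1.mem_iff.mp hx)
  have m2 : ∀ x ∈ PySem.List.sorted a (fun x => |x|) false, x < 0 :=
    fun x hx => hneg x (p2.mem_iff.mp hx)
  exact List.Perm.eq_of_pairwise (le := fun x y => y ≤ x)
    (fun x y _ _ h1 h2 => le_antisymm h2 h1)
    (vdesc _ m1 (PySem.List.sorted_pairwise _ _))
    (vdesc _ m2 (PySem.List.sorted_pairwise _ _))
    (p1.trans p2.symm)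

-- bounds for A's nested max-update loop
theorem pvA_ge_init {α β : Type} (I : List α) (J : List β) (v : α → β → Int) (init : Int) :
    init ≤ I.foldl (fun acc i => J.foldl (fun acc j => max acc (v i j)) acc) init := by
  induction I generalizing init with
  | nil => simp
  | cons x xs ih =>
    refine le_trans ?_ (ih _)
    exact (PySem.List.le_foldl_max_int J (v x) init).1

theorem pvA_ge {α β : Type} (I : List α) (J : List β) (v : α → β → Int) (init : Int)
    {i : α} {j : β} (hi : i ∈ I) (hj : j ∈ J) :
    v i j ≤ I.foldl (fun acc i => J.foldl (fun acc j => max acc (v i j)) acc) init := by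
  induction I generalizing init with
  | nil => cases hi
  | cons x xs ih =>
    rcases List.mem_cons.mp hi with h | h
    · subst h
      exact le_trans ((PySem.List.le_foldl_max_int J (v i) init).2 j hj)
        (pvA_ge_init xs J v _)
    · exact ih _ h

theorem pv_foldl_max_le {β : Type} (J : List β) (f : β → Int) (init b : Int)
    (h0 : init ≤ b) (h : ∀ j ∈ J, f j ≤ b) :
    J.foldl (fun acc j => max acc (f j)) init ≤ b := by
  induction J generalizing init with
  | nil => simpa using h0
  | cons x xs ih =>
    exact ih _ (max_le h0 (h x List.mem_cons_self)) (fun j hj => h j (List.mem_cons_of_mem _ hj))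

theorem pvA_le {α β : Type} (I : List α) (J : List β) (v : α → β → Int) (init b : Int)
    (h0 : init ≤ b) (h : ∀ i ∈ I, ∀ j ∈ J, v i j ≤ b) :
    I.foldl (fun acc i => J.foldl (fun acc j => max acc (v i j)) acc) init ≤ b := by
  induction I generalizing init with
  | nil => simpa using h0
  | cons x xs ih =>
    exact ih _ (pv_foldl_max_le J (v x) init b h0 (fun j hj => h x List.mem_cons_self j hj))
      (fun i hi j hj => h i (List.mem_cons_of_mem _ hi) j hj)

-- bounds for B's double-max loop
theorem pvB_ge_init {β : Type} (J : List β) (g h : β → Int) (init : Int) :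
    init ≤ J.foldl (fun acc j => max (max acc (g j)) (h j)) init := by
  induction J generalizing init with
  | nil => simp
  | cons x xs ih =>
    exact le_trans (le_max_of_le_left (le_max_left _ _)) (ih _)

theorem pvB_ge {β : Type} (J : List β) (g h : β → Int) (init : Int) {j : β} (hj : j ∈ J) :
    max (g j) (h j) ≤ J.foldl (fun acc j => max (max acc (g j)) (h j)) init := by
  induction J generalizing init with
  | nil => cases hj
  | cons x xs ih =>
    rcases List.mem_cons.mp hj with hh | hh
    · subst hh
      refine le_trans ?_ (pvB_ge_init xs g h _)
      exact max_le (le_max_of_le_left (le_max_right _ _)) (le_max_right _ _)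
    · exact ih _ hh

theorem pvB_le {β : Type} (J : List β) (g h : β → Int) (init b : Int)
    (h0 : init ≤ b) (hg : ∀ j ∈ J, g j ≤ b) (hh : ∀ j ∈ J, h j ≤ b) :
    J.foldl (fun acc j => max (max acc (g j)) (h j)) init ≤ b := by
  induction J generalizing init with
  | nil => simpa using h0
  | cons x xs ih =>
    exact ih _ (max_le (max_le h0 (hg x List.mem_cons_self)) (hh x List.mem_cons_self))
      (fun j hj => hg j (List.mem_cons_of_mem _ hj)) (fun j hj => hh j (List.mem_cons_of_mem _ hj))

-- a list of length ≥ 6 starts with five explicit elements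
theorem pv_len6 {α : Type} (l : List α) (h : 6 ≤ l.length) :
    ∃ x0 x1 x2 x3 x4 t, l = x0 :: x1 :: x2 :: x3 :: x4 :: t := by
  rcases l with _ | ⟨x0, _ | ⟨x1, _ | ⟨x2, _ | ⟨x3, _ | ⟨x4, t⟩⟩⟩⟩⟩
  all_goals first
    | exact ⟨x0, x1, x2, x3, x4, t, rfl⟩
    | simp at h

-- c*x lies between c*lo and c*hi when lo ≤ x ≤ hi
theorem pv_mul_between (c x lo hi : Int) (h1 : lo ≤ x) (h2 : x ≤ hi) :
    c * x ≤ max (c * hi) (c * lo) := by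
  rcases le_total 0 c with hc | hc
  · exact le_max_of_le_left (by nlinarith)
  · exact le_max_of_le_right (by nlinarith)

-- ===== VERDICT (by name: the statement is the Claim_ definition above) =====
theorem max_product_of_five_spec : Claim_equal_max_product_of_five := by
  intro a _hdom hpre
  unfold Spec_max_product_of_five max_product_of_five max_product_of_five_alt
  cases hmx : PySem.List.max? a (fun x => x) with
  | none => exact absurd ((PySem.List.max?_eq_none_iff a (fun x => x)).mp hmx) hpre
  | some mx =>
    have hmxmem : mx ∈ a := PySem.List.max?_mem hmx
    have hmxmax : ∀ y ∈ a, y ≤ mx := PySem.List.max?_isMax hmx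
    dsimp only
    by_cases hneg : mx < 0
    · -- all-negative branch
      have hall : (a.all fun x => decide (x < 0)) = true := by
        simp only [List.all_eq_true, decide_eq_true_eq]
        exact fun x hx => lt_of_le_of_lt (hmxmax x hx) hneg
      rw [if_pos hneg, if_pos hall,
        pv_double_sort a (by simpa [List.all_eq_true] using hall)]
    · have hall : ¬ ((a.all fun x => decide (x < 0)) = true) := by
        simp only [List.all_eq_true, decide_eq_true_eq]
        intro h; exact hneg (h mx hmxmem)
      rw [if_neg hneg, if_neg hall]
      set s := PySem.List.sorted a (fun x => |x|) true with hs
      have hslen : s.length = a.length := PySem.List.length_sorted a (fun x => |x|) true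
      have hdrop : PySem.List.slice s (some 5) none = s.drop 5 := by
        rw [PySem.List.slice_from s (by norm_num : (0:Int) ≤ 5)]; rfl
      by_cases hrest : PySem.List.slice s (some 5) none = []
      · -- rest empty: A's replacement loop is over the empty range
        rw [if_pos hrest]
        rw [hdrop] at hrest
        have hlen : a.length ≤ 5 := by
          have := congrArg List.length hrest; simp at this; omega
        rw [PySem.List.pyRange_one_eq_nil (a := 5) (b := (a.length : Int)) (by omega)]
        rfl
      · rw [if_neg hrest]
        rw [hdrop] at hrest
        have hlen6 : 6 ≤ s.length := by
          by_contra hcon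
          exact hrest (List.drop_eq_nil_of_le (by omega))
        obtain ⟨x0, x1, x2, x3, x4, t, hseq⟩ := pv_len6 s hlen6
        have hpicks : PySem.List.slice s none (some 5) = [x0, x1, x2, x3, x4] := by
          rw [PySem.List.slice_to s (by norm_num : (0:Int) ≤ 5), hseq]; rfl
        have hlen5 : 5 < a.length := by omega
        have htne : s.drop 5 ≠ [] := hrest
        obtain ⟨hi, hhi⟩ : ∃ m, PySem.List.max? (s.drop 5) (fun x => x) = some m := by
          cases h : PySem.List.max? (s.drop 5) (fun x => x) with
          | none => exact absurd ((PySem.List.max?_eq_none_iff (s.drop 5) (fun x => x)).mp h) htne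
          | some m => exact ⟨m, rfl⟩
        obtain ⟨lo, hlo⟩ : ∃ m, PySem.List.min? (s.drop 5) (fun x => x) = some m := by
          cases h : PySem.List.min? (s.drop 5) (fun x => x) with
          | none => exact absurd ((PySem.List.min?_eq_none_iff (s.drop 5) (fun x => x)).mp h) htne
          | some m => exact ⟨m, rfl⟩
        have hhi_mem : hi ∈ s.drop 5 := PySem.List.max?_mem hhi
        have hhi_ub : ∀ y ∈ s.drop 5, y ≤ hi := PySem.List.max?_isMax hhi
        have hlo_mem : lo ∈ s.drop 5 := PySem.List.min?_mem hlo
        have hlo_lb : ∀ y ∈ s.drop 5, lo ≤ y := PySem.List.min?_isMin hlo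
        have hmem : ∀ i ∈ PySem.List.pyRange 5 (a.length : Int) 1,
            PySem.List.pyGetD s i 0 ∈ s.drop 5 := by
          intro i hi'
          obtain ⟨h5i, hin⟩ := (PySem.List.mem_pyRange_one).mp hi'
          have h0i : (0:Int) ≤ i := by omega
          have hilen : i < (s.length : Int) := by rw [hslen]; omega
          rw [PySem.List.pyGetD_eq_getElem s 0 h0i hilen]
          have hkn : i.toNat < s.length := by omega
          have h5k : 5 ≤ i.toNat := by omega
          have : s[i.toNat] = (s.drop 5)[i.toNat - 5]'(by simp; omega) := by
            rw [List.getElem_drop]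
            congr 1
            omega
          rw [this]
          exact List.getElem_mem _
        have hsurj : ∀ x ∈ s.drop 5, ∃ i ∈ PySem.List.pyRange 5 (a.length : Int) 1,
            PySem.List.pyGetD s i 0 = x := by
          intro x hx
          obtain ⟨k, hk, hxk⟩ := List.mem_iff_getElem.mp hx
          refine ⟨((5 + k : Nat) : Int), ?_, ?_⟩
          · rw [PySem.List.mem_pyRange_one]
            have h2 : (s.drop 5).length = s.length - 5 := by simp
            omega
          · have h0i : (0:Int) ≤ ((5 + k : Nat) : Int) := by omega
            have hilen : ((5 + k : Nat) : Int) < (s.length : Int) := by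
              have : (s.drop 5).length = s.length - 5 := by simp
              omega
            rw [PySem.List.pyGetD_eq_getElem s 0 h0i hilen]
            rw [← hxk, List.getElem_drop]
            simp [show ((5:Int) + (k:Int)).toNat = 5 + k from by omega]
        -- the five picks read off s
        have hg0 : PySem.List.pyGetD s 0 0 = x0 := by rw [hseq]; simp [PySem.List.pyGetD_zero_cons]
        have hg1 : PySem.List.pyGetD s 1 0 = x1 := by
          rw [hseq, show ((1:Int)) = ((1:Nat):Int) from rfl, PySem.List.pyGetD_natCast]; rfl
        have hg2 : PySem.List.pyGetD s 2 0 = x2 := by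
          rw [hseq, show ((2:Int)) = ((2:Nat):Int) from rfl, PySem.List.pyGetD_natCast]; rfl
        have hg3 : PySem.List.pyGetD s 3 0 = x3 := by
          rw [hseq, show ((3:Int)) = ((3:Nat):Int) from rfl, PySem.List.pyGetD_natCast]; rfl
        have hg4 : PySem.List.pyGetD s 4 0 = x4 := by
          rw [hseq, show ((4:Int)) = ((4:Nat):Int) from rfl, PySem.List.pyGetD_natCast]; rfl
        have hpre : (List.foldl (fun st x => (st.1 ++ [st.2 * x], st.2 * x))
            (([(1:Int)], (1:Int))) [x0, x1, x2, x3, x4]).1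
            = [1, 1*x0, 1*x0*x1, 1*x0*x1*x2, 1*x0*x1*x2*x3, 1*x0*x1*x2*x3*x4] := rfl
        have hsuf : (List.foldl (fun st x => (st.1 ++ [st.2 * x], st.2 * x))
            (([(1:Int)], (1:Int))) ([x0, x1, x2, x3, x4].reverse)).1
            = [1, 1*x4, 1*x4*x3, 1*x4*x3*x2, 1*x4*x3*x2*x1, 1*x4*x3*x2*x1*x0] := rfl
        rw [hpicks, hdrop, hhi, hlo]
        simp only [pv_foldl_if_mul, Option.getD_some, hpre, hsuf]
        -- replace B's prefix/suffix-product coefficient by A's omit-one filtered product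
        have hc : ∀ (acc j : Int), j ∈ PySem.List.pyRange 0 5 1 →
            max (max acc ((PySem.List.pyGetD [1, 1*x0, 1*x0*x1, 1*x0*x1*x2, 1*x0*x1*x2*x3, 1*x0*x1*x2*x3*x4] j 0 *
                  PySem.List.pyGetD [1, 1*x4, 1*x4*x3, 1*x4*x3*x2, 1*x4*x3*x2*x1, 1*x4*x3*x2*x1*x0] (4 - j) 0) * hi))
              ((PySem.List.pyGetD [1, 1*x0, 1*x0*x1, 1*x0*x1*x2, 1*x0*x1*x2*x3, 1*x0*x1*x2*x3*x4] j 0 *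
                  PySem.List.pyGetD [1, 1*x4, 1*x4*x3, 1*x4*x3*x2, 1*x4*x3*x2*x1, 1*x4*x3*x2*x1*x0] (4 - j) 0) * lo)
            = max (max acc (((List.filter (fun k => decide (k ≠ j)) (PySem.List.pyRange 0 5 1)).map
                  (fun k => PySem.List.pyGetD s k 0)).prod * hi))
                (((List.filter (fun k => decide (k ≠ j)) (PySem.List.pyRange 0 5 1)).map
                  (fun k => PySem.List.pyGetD s k 0)).prod * lo) := by
          intro acc j hj
          obtain ⟨hj0, hj5⟩ := (PySem.List.mem_pyRange_one).mp hj
          have hR : PySem.List.pyRange 0 5 1 = [0, 1, 2, 3, 4] := by decide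
          interval_cases j <;>
            ·  simp [hR, hg0, hg1, hg2, hg3, hg4, PySem.List.pyGetD_ofNat']
               try simp [PySem.List.pyIdx?]
               try ring_nf
        rw [PySem.List.foldl_congr_mem _ _ _ _ hc]
        refine le_antisymm ?_ ?_
        · refine pvA_le _ _ _ _ _ (pvB_ge_init _ _ _ _) ?_
          intro i hi' j hj'
          have hxmem := hmem i hi'
          refine le_trans ?_ (pvB_ge _ _ _ _ hj')
          rw [mul_comm]
          exact pv_mul_between _ _ lo hi (hlo_lb _ hxmem) (hhi_ub _ hxmem)
        · refine pvB_le _ _ _ _ _ (pvA_ge_init _ _ _ _) ?_ ?_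
          · intro j hj'
            obtain ⟨i, hi', hieq⟩ := hsurj hi hhi_mem
            have := pvA_ge _ _ (fun i j => PySem.List.pyGetD s i 0 *
              (List.map (fun k => PySem.List.pyGetD s k 0)
                (List.filter (fun k => decide (k ≠ j)) (PySem.List.pyRange 0 5 1))).prod)
              (([x0, x1, x2, x3, x4] : List Int).prod) hi' hj'
            beta_reduce at this
            rw [hieq] at this
            calc _ = hi * (List.map (fun k => PySem.List.pyGetD s k 0)
                (List.filter (fun k => decide (k ≠ j)) (PySem.List.pyRange 0 5 1))).prod := mul_comm _ _
              _ ≤ _ := this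
          · intro j hj'
            obtain ⟨i, hi', hieq⟩ := hsurj lo hlo_mem
            have := pvA_ge _ _ (fun i j => PySem.List.pyGetD s i 0 *
              (List.map (fun k => PySem.List.pyGetD s k 0)
                (List.filter (fun k => decide (k ≠ j)) (PySem.List.pyRange 0 5 1))).prod)
              (([x0, x1, x2, x3, x4] : List Int).prod) hi' hj'
            beta_reduce at this
            rw [hieq] at this
            calc _ = lo * (List.map (fun k => PySem.List.pyGetD s k 0)
                (List.filter (fun k => decide (k ≠ j)) (PySem.List.pyRange 0 5 1))).prod := mul_comm _ _
              _ ≤ _ := this
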